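-- pv_equiv track=rewrite | github.com/daeni-dang/Baekjoon_with_python | 스터디/0225/2149. 암호 해독.py | solution
-- ===== SOURCE A (Python) =====
-- def solution(keyStr, encoded):
--     answer = [""] * len(encoded)
--     n, m = len(encoded) // len(keyStr), len(keyStr)
--     board = [[""] * m for _ in range(n)]
--     for i in range(n):
--         for j in range(m):
--             board[i][j] = encoded[i + j * n]
--     keyList = []
--     for i in range(m):
--         keyList.append([keyStr[i], i])
--     keyList.sort()
--     for i in range(n):
--         for j in range(m):
--             answer[i * m + keyList[j][1]] = board[i][j]
--     return ''.join(answer)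
-- ===== SOURCE B (Python) =====
-- def solution(keyStr, encoded):
--     m = len(keyStr)
--     n = len(encoded) // m
--     cols = [encoded[j * n:(j + 1) * n] for j in range(m)]
--     order = sorted(range(m), key=lambda i: keyStr[i])
--     grid = [""] * m
--     for j in range(m):
--         grid[order[j]] = cols[j]
--     return ''.join(grid[c][i] for i in range(n) for c in range(m))
-- ===== Notes on version B (the rewrite author's own statement) =====
-- stated objective: faster
-- what changed: Replaces the per-character board fill and scatter into a positional answer array with column slicing, a stable index sort (sorted(range(m), key=...)) for the key permutation, and a direct row-major join over the permuted column strings.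
import Mathlib
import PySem

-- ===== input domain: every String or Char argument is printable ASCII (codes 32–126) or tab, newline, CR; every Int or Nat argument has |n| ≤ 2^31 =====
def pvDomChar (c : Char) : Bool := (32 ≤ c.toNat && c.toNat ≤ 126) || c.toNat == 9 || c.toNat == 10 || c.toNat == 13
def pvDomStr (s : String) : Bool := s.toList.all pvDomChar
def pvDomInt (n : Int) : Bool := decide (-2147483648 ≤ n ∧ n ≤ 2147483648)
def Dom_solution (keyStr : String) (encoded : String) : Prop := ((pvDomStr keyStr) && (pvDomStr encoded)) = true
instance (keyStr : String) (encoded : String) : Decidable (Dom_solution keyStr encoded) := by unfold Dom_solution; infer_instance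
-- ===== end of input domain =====

-- B replaces A's per-character board fill and positional scatter by column slices, a stable
-- index sort for the key permutation, and one row-major join (measured constant-factor speedup).

-- ===== PORT A =====
def solution (keyStr : String) (encoded : String) : String :=
  let K := keyStr.toList
  let E := encoded.toList
  let m := K.length
  let n := E.length / m
  let board : List (List Char) :=
    (List.range n).map (fun i => (List.range m).map (fun j => E.getD (i + j * n) ' '))
  let keyList : List (Char × Nat) := (List.range m).map (fun i => (K.getD i ' ', i))
  let keyListS := PySem.List.sorted2 keyList Prod.fst Prod.snd
  let answer : List (List Char) :=
    (List.range n).foldl (fun ans i =>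
      (List.range m).foldl (fun ans j =>
        ans.set (i * m + (keyListS.getD j (' ', 0)).2) [(board.getD i []).getD j ' ']) ans)
      (List.replicate E.length ([] : List Char))
  String.ofList (PySem.Chars.join [] answer)

-- ===== PORT B =====
def solution_alt (keyStr : String) (encoded : String) : String :=
  let K := keyStr.toList
  let E := encoded.toList
  let m := K.length
  let n := E.length / m
  let cols : List (List Char) :=
    (List.range m).map (fun j =>
      PySem.List.slice E (some ((j * n : Nat) : Int)) (some (((j + 1) * n : Nat) : Int)))
  let order := PySem.List.sorted (List.range m) (fun i => K.getD i ' ')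
  let grid := (List.range m).foldl (fun g j => g.set (order.getD j 0) (cols.getD j []))
      (List.replicate m ([] : List Char))
  String.ofList ((List.range n).flatMap (fun i =>
    (List.range m).map (fun c => (grid.getD c []).getD i ' ')))

-- ===== PRECONDITION & SPEC =====
-- Pre_ excludes exactly the empty key string, on which Python A raises ZeroDivisionError.
def Pre_solution (keyStr : String) (encoded : String) : Prop := keyStr.toList ≠ []
instance (keyStr : String) (encoded : String) : Decidable (Pre_solution keyStr encoded) := by
  unfold Pre_solution; infer_instance

def pvWitness_solution : String × String := ("bca", "hlodelworl")

def Spec_solution (keyStr : String) (encoded : String) (out : String) : Prop := out = solution_alt keyStr encoded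
instance (keyStr : String) (encoded : String) (out : String) : Decidable (Spec_solution keyStr encoded out) := by unfold Spec_solution; infer_instance

-- ===== CLAIM (what is proved, stated in full; the proofs are below) =====
def Claim_equal_solution : Prop := ∀ (keyStr : String) (encoded : String), Dom_solution keyStr encoded → Pre_solution keyStr encoded → Spec_solution keyStr encoded (solution keyStr encoded)

-- ===== LEMMAS AND PROOFS =====

-- the key permutation (stable sort of indices) and the common canonical output
def pvOrd (K : List Char) : List Nat :=
  PySem.List.sorted (List.range K.length) (fun i => K.getD i ' ')

def pvCanon (K E : List Char) : List Char :=
  (List.range (E.length / K.length * K.length)).map (fun p =>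
    E.getD (p / K.length + (pvOrd K).idxOf (p % K.length) * (E.length / K.length)) ' ')

-- generic "fold of in-place writes" machinery
def pvSetFold {β : Type} (ws : List (Nat × β)) (init : List β) : List β :=
  ws.foldl (fun a qv => a.set qv.1 qv.2) init

theorem pvSetFold_length {β : Type} (ws : List (Nat × β)) (init : List β) :
    (pvSetFold ws init).length = init.length := by
  induction ws generalizing init with
  | nil => rfl
  | cons w t ih => simpa [pvSetFold, List.foldl_cons] using ih (init.set w.1 w.2)

theorem pvSetFold_getElem?_not_mem {β : Type} (ws : List (Nat × β)) (init : List β) (p : Nat)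
    (h : p ∉ ws.map Prod.fst) : (pvSetFold ws init)[p]? = init[p]? := by
  induction ws generalizing init with
  | nil => rfl
  | cons w t ih =>
    simp only [List.map_cons, List.mem_cons, not_or] at h
    rw [pvSetFold, List.foldl_cons, ← pvSetFold, ih _ (h.2),
      List.getElem?_set_ne (fun hq => h.1 hq.symm)]

theorem pvSetFold_getElem?_mem {β : Type} (ws : List (Nat × β)) (init : List β) (p : Nat) (v : β)
    (hnd : (ws.map Prod.fst).Nodup) (hmem : (p, v) ∈ ws) (hlt : p < init.length) :
    (pvSetFold ws init)[p]? = some v := by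
  induction ws generalizing init with
  | nil => simp at hmem
  | cons w t ih =>
    simp only [List.map_cons, List.nodup_cons] at hnd
    rcases List.mem_cons.mp hmem with h | h
    · subst h
      rw [pvSetFold, List.foldl_cons, ← pvSetFold,
        pvSetFold_getElem?_not_mem _ _ _ hnd.1, List.getElem?_set_self hlt]
    · rw [pvSetFold, List.foldl_cons, ← pvSetFold]
      exact ih _ hnd.2 h (by simpa using hlt)

-- facts about pvOrd
theorem pvOrd_perm (K : List Char) : (pvOrd K).Perm (List.range K.length) :=
  PySem.List.sorted_perm _ _ _

theorem pvOrd_length (K : List Char) : (pvOrd K).length = K.length := by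
  simpa using (pvOrd_perm K).length_eq

theorem pvOrd_nodup (K : List Char) : (pvOrd K).Nodup :=
  ((pvOrd_perm K).nodup_iff).mpr (List.nodup_range)

theorem pvOrd_mem (K : List Char) (c : Nat) : c ∈ pvOrd K ↔ c < K.length := by
  rw [(pvOrd_perm K).mem_iff, List.mem_range]

theorem pvOrd_getD_idxOf (K : List Char) (c : Nat) (hc : c < K.length) :
    (pvOrd K).getD ((pvOrd K).idxOf c) 0 = c := by
  have hmem : c ∈ pvOrd K := (pvOrd_mem K c).mpr hc
  have hlt := List.idxOf_lt_length_of_mem hmem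
  rw [List.getD_eq_getElem?_getD, List.getElem?_eq_getElem hlt, List.getElem_idxOf]
  rfl

theorem pvOrd_idxOf_lt (K : List Char) (c : Nat) (hc : c < K.length) :
    (pvOrd K).idxOf c < K.length := by
  rw [← pvOrd_length K]
  exact List.idxOf_lt_length_of_mem ((pvOrd_mem K c).mpr hc)

-- sort bridge: sorting the (char, index) pairs = stable index sort, mapped
theorem pvInsert_bridge (key : Nat → Char) (qs : List Nat) (t : Nat) (h : ∀ q ∈ qs, q < t) :
    PySem.List.insertBy
        (fun a b => decide (a.1 < b.1) || (!decide (b.1 < a.1) && decide (a.2 < b.2)))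
        (key t, t) (qs.map (fun i => (key i, i)))
      = (PySem.List.insertBy (fun a b => decide (key a < key b)) t qs).map
          (fun i => (key i, i)) := by
  induction qs with
  | nil => simp [PySem.List.insertBy]
  | cons q tl ih =>
    have hq : q < t := h q (by simp)
    have hnt : ¬ (t < q) := by omega
    simp only [List.map_cons, PySem.List.insertBy, hnt, decide_false, Bool.and_false,
      Bool.or_false]
    by_cases hlt : key t < key q
    · simp [hlt]
    · simp [hlt, ih (fun q hq => h q (by simp [hq]))]

theorem pvFold_bridge (key : Nat → Char) (is qs : List Nat)
    (hp : is.Pairwise (· < ·)) (h : ∀ q ∈ qs, ∀ i ∈ is, q < i) :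
    List.foldl
        (fun acc x => PySem.List.insertBy
          (fun a b => decide (a.1 < b.1) || (!decide (b.1 < a.1) && decide (a.2 < b.2))) x acc)
        (qs.map (fun i => (key i, i))) (is.map (fun i => (key i, i)))
      = (List.foldl (fun acc x =>
          PySem.List.insertBy (fun a b => decide (key a < key b)) x acc) qs is).map
          (fun i => (key i, i)) := by
  induction is generalizing qs with
  | nil => simp
  | cons i tl ih =>
    rw [List.map_cons, List.foldl_cons, List.foldl_cons,
      pvInsert_bridge key qs i (fun q hq => h q hq i (by simp))]
    refine ih _ (hp.sublist (List.sublist_cons_self i tl)) ?_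
    intro q hq i' hi'
    rcases (PySem.List.mem_insertBy _ _ _ _).mp hq with rfl | hq2
    · exact (List.pairwise_cons.mp hp).1 i' hi'
    · exact h q hq2 i' (by simp [hi'])

theorem pvSorted2_bridge (K : List Char) :
    PySem.List.sorted2 ((List.range K.length).map (fun i => (K.getD i ' ', i))) Prod.fst Prod.snd
      = (pvOrd K).map (fun i => (K.getD i ' ', i)) := by
  rw [pvOrd, PySem.List.sorted_eq_foldl_insertBy, PySem.List.sorted2]
  simpa using pvFold_bridge (fun i => K.getD i ' ') (List.range K.length) []
    List.pairwise_lt_range (by simp)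

-- range decomposition for the row-major traversal
theorem pvRangeMul {α : Type} (n m : Nat) (g : Nat → Nat → α) :
    (List.range n).flatMap (fun i => (List.range m).map (fun c => g i c))
      = (List.range (n * m)).map (fun p => g (p / m) (p % m)) := by
  induction n with
  | zero => simp
  | succ n ih =>
    rw [List.range_succ, List.flatMap_append, ih, Nat.succ_mul, List.range_add,
      List.map_append]
    congr 1
    simp only [List.flatMap_cons, List.flatMap_nil, List.append_nil, List.map_map]
    refine List.map_congr_left (fun a ha => ?_)
    have ham : a < m := List.mem_range.mp ha
    have hm : 0 < m := Nat.lt_of_le_of_lt (Nat.zero_le a) ham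
    simp only [Function.comp]
    rw [Nat.mul_comm n m, Nat.mul_add_div hm, Nat.mul_add_mod, Nat.div_eq_of_lt ham,
      Nat.mod_eq_of_lt ham, Nat.add_zero]

-- join [] is flatten
theorem pvJoinNil (l : List (List Char)) : PySem.Chars.join [] l = l.flatten := by
  simp [PySem.Chars.join, List.intercalate]
  induction l with
  | nil => simp
  | cons a t ih => cases t <;> simp_all [List.intersperse]

theorem pvOrd_getD_lt (K : List Char) (q : Nat) (hq : q < K.length) :
    (pvOrd K).getD q 0 < K.length := by
  rw [← pvOrd_mem]
  rw [List.getD_eq_getElem?_getD, List.getElem?_eq_getElem (by rw [pvOrd_length]; exact hq)]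
  exact List.getElem_mem _

-- characterization of A's answer array
theorem pvA_answer (E : List Char) (K : List Char) :
    ((List.range (E.length / K.length)).foldl (fun ans i =>
        (List.range K.length).foldl (fun ans j =>
          ans.set (i * K.length + (((pvOrd K).map (fun i => (K.getD i ' ', i))).getD j (' ', 0)).2)
            [(((List.range (E.length / K.length)).map (fun i =>
                (List.range K.length).map (fun j =>
                  E.getD (i + j * (E.length / K.length)) ' '))).getD i []).getD j ' ']) ans)
        (List.replicate E.length ([] : List Char)))
      = (List.range (E.length / K.length * K.length)).map (fun p =>
          [E.getD (p / K.length + (pvOrd K).idxOf (p % K.length) * (E.length / K.length)) ' '])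
        ++ List.replicate (E.length - E.length / K.length * K.length) [] := by
  set m := K.length with hm
  set n := E.length / m with hn
  set ord := pvOrd K with hordd
  have hordlen : ord.length = m := pvOrd_length K
  have hnm : n * m ≤ E.length := by rw [hn]; exact Nat.div_mul_le_self _ _
  -- Step 1: normalize the loop body
  have h1 : ((List.range n).foldl (fun ans i =>
        (List.range m).foldl (fun ans j =>
          ans.set (i * m + ((ord.map (fun i => (K.getD i ' ', i))).getD j (' ', 0)).2)
            [(((List.range n).map (fun i =>
                (List.range m).map (fun j => E.getD (i + j * n) ' '))).getD i []).getD j ' ']) ans)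
        (List.replicate E.length ([] : List Char)))
      = ((List.range n).foldl (fun ans i =>
        (List.range m).foldl (fun ans j =>
          ans.set (i * m + ord.getD j 0) [E.getD (i + j * n) ' ']) ans)
        (List.replicate E.length ([] : List Char))) := by
    refine PySem.List.foldl_congr_mem _ _ _ _ ?_
    intro acc i hi
    refine PySem.List.foldl_congr_mem _ _ _ _ ?_
    intro acc2 j hj
    have hi' : i < n := List.mem_range.mp hi
    have hj' : j < m := List.mem_range.mp hj
    have hjo : j < ord.length := by rw [hordlen]; exact hj'
    congr 2
    · rw [List.getD_eq_getElem?_getD, List.getElem?_map, List.getElem?_eq_getElem hjo]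
      simp [List.getD_eq_getElem?_getD, List.getElem?_eq_getElem hjo]
    · rw [PySem.List.getD_map_range _ _ _ _ hi', PySem.List.getD_map_range _ _ _ _ hj']
  rw [h1]
  -- Step 2: as a write list
  have h2 : ((List.range n).foldl (fun ans i =>
        (List.range m).foldl (fun ans j =>
          ans.set (i * m + ord.getD j 0) [E.getD (i + j * n) ' ']) ans)
        (List.replicate E.length ([] : List Char)))
      = pvSetFold ((List.range n).flatMap (fun i => (List.range m).map (fun j =>
          (i * m + ord.getD j 0, [E.getD (i + j * n) ' ']))))
          (List.replicate E.length ([] : List Char)) := by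
    rw [pvSetFold, List.foldl_flatMap]
    refine (PySem.List.foldl_congr_mem _ _ _ _ ?_).symm
    intro acc i _
    rw [List.foldl_map]
  rw [h2]
  set W := (List.range n).flatMap (fun i => (List.range m).map (fun j =>
          (i * m + ord.getD j 0, [E.getD (i + j * n) ' ']))) with hW
  -- the writes' positions
  have hWfst : W.map Prod.fst = (List.range (n * m)).map (fun p => p / m * m + ord.getD (p % m) 0) := by
    rw [hW, List.map_flatMap]
    have : ∀ i : Nat, (List.map Prod.fst ((List.range m).map (fun j =>
        ((i * m + ord.getD j 0, [E.getD (i + j * n) ' ']) : Nat × List Char))))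
        = (List.range m).map (fun j => i * m + ord.getD j 0) := by
      intro i; rw [List.map_map]; rfl
    simp only [this]
    exact pvRangeMul n m _
  have hposlt : ∀ p, p < n * m → p / m * m + ord.getD (p % m) 0 < n * m := by
    intro p hp
    have hm0 : 0 < m := by
      by_contra h
      simp only [Nat.not_lt] at h
      have hz : m = 0 := Nat.le_zero.mp h
      rw [hz, Nat.mul_zero] at hp
      exact Nat.not_lt_zero p hp
    have h1 : p / m < n := Nat.div_lt_of_lt_mul (by rw [Nat.mul_comm]; exact hp)
    have h2 : ord.getD (p % m) 0 < m := pvOrd_getD_lt K _ (Nat.mod_lt _ hm0)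
    calc p / m * m + ord.getD (p % m) 0 < p / m * m + m := by omega
      _ = (p / m + 1) * m := by ring
      _ ≤ n * m := Nat.mul_le_mul_right _ (by omega)
  have hm0' : ∀ p, p < n * m → 0 < m := by
    intro p hp
    by_contra h
    simp only [Nat.not_lt] at h
    have hz : m = 0 := Nat.le_zero.mp h
    rw [hz, Nat.mul_zero] at hp
    exact Nat.not_lt_zero p hp
  have hnd : (W.map Prod.fst).Nodup := by
    rw [hWfst]
    refine (List.nodup_range (n := n * m)).map_on ?_
    intro p hp q hq heq
    have hp' : p < n * m := List.mem_range.mp hp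
    have hq' : q < n * m := List.mem_range.mp hq
    have hm0 : 0 < m := hm0' p hp'
    have hpm : p % m < ord.length := by rw [hordlen]; exact Nat.mod_lt _ hm0
    have hqm : q % m < ord.length := by rw [hordlen]; exact Nat.mod_lt _ hm0
    have h2 : ord.getD (p % m) 0 < m := pvOrd_getD_lt K _ (Nat.mod_lt _ hm0)
    have h3 : ord.getD (q % m) 0 < m := pvOrd_getD_lt K _ (Nat.mod_lt _ hm0)
    have e1 : (p / m * m + ord.getD (p % m) 0) / m = p / m := by
      rw [Nat.mul_comm (p / m) m, Nat.mul_add_div hm0, Nat.div_eq_of_lt h2, Nat.add_zero]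
    have e2 : (q / m * m + ord.getD (q % m) 0) / m = q / m := by
      rw [Nat.mul_comm (q / m) m, Nat.mul_add_div hm0, Nat.div_eq_of_lt h3, Nat.add_zero]
    have hdiv : p / m = q / m := by rw [← e1, ← e2, heq]
    rw [hdiv] at heq
    have hrest : ord.getD (p % m) 0 = ord.getD (q % m) 0 := by omega
    have hmodeq : p % m = q % m := by
      rw [List.getD_eq_getElem?_getD, List.getElem?_eq_getElem hpm,
        List.getD_eq_getElem?_getD, List.getElem?_eq_getElem hqm] at hrest
      exact ((pvOrd_nodup K).getElem_inj_iff).mp (by simpa using hrest)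
    have d1 := Nat.div_add_mod p m
    have d2 := Nat.div_add_mod q m
    rw [hdiv] at d1
    omega
  -- membership of the canonical write
  have hmem : ∀ p, p < n * m →
      ((p, [E.getD (p / m + ord.idxOf (p % m) * n) ' ']) : Nat × List Char) ∈ W := by
    intro p hp
    have hm0 : 0 < m := hm0' p hp
    have hpm : p % m < m := Nat.mod_lt _ hm0
    have hdivlt : p / m < n := Nat.div_lt_of_lt_mul (by rw [Nat.mul_comm]; exact hp)
    rw [hW, List.mem_flatMap]
    refine ⟨p / m, List.mem_range.mpr hdivlt, ?_⟩
    rw [List.mem_map]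
    refine ⟨ord.idxOf (p % m), List.mem_range.mpr (by rw [hordd] at *; exact pvOrd_idxOf_lt K _ hpm), ?_⟩
    rw [hordd]
    rw [pvOrd_getD_idxOf K _ hpm]
    have hpp : p / m * m + p % m = p := by
      rw [Nat.mul_comm (p / m) m]; exact Nat.div_add_mod p m
    rw [hpp]
  -- final extensional equality
  have hinitlen : (List.replicate E.length ([] : List Char)).length = E.length := by
    simp
  refine List.ext_getElem ?_ ?_
  · rw [pvSetFold_length, hinitlen, List.length_append, List.length_map,
      List.length_range, List.length_replicate]
    omega
  intro p h1p h2p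
  rw [pvSetFold_length, hinitlen] at h1p
  rcases Nat.lt_or_ge p (n * m) with hlt | hge
  · have hv := pvSetFold_getElem?_mem W (List.replicate E.length ([] : List Char)) p _ hnd (hmem p hlt) (by rw [hinitlen]; exact h1p)
    have : (pvSetFold W (List.replicate E.length ([] : List Char)))[p] =
        [E.getD (p / m + ord.idxOf (p % m) * n) ' '] := by
      rw [← Option.some_inj, ← List.getElem?_eq_getElem]
      exact hv
    rw [this, List.getElem_append_left (by simpa using hlt)]
    simp
  · have hnotmem : p ∉ W.map Prod.fst := by
      rw [hWfst]
      intro hmm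
      rcases List.mem_map.mp hmm with ⟨q, hq, hqe⟩
      have hq' : q < n * m := List.mem_range.mp hq
      have := hposlt q hq'
      omega
    have hv := pvSetFold_getElem?_not_mem W (List.replicate E.length ([] : List Char)) p hnotmem
    have : (pvSetFold W (List.replicate E.length ([] : List Char)))[p] = ([] : List Char) := by
      rw [← Option.some_inj, ← List.getElem?_eq_getElem, hv]
      rw [List.getElem?_eq_getElem (by simpa using h1p)]
      simp
    rw [this, List.getElem_append_right (by simpa using hge)]
    simp

theorem pvFlattenSingletons {α : Type} (l : List Nat) (f : Nat → α) :
    (l.map (fun p => [f p])).flatten = l.map f := by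
  induction l with
  | nil => rfl
  | cons a t ih => simp only [List.map_cons, List.flatten_cons, ih, List.singleton_append]

theorem pvA_eq (keyStr encoded : String) :
    solution keyStr encoded = String.ofList (pvCanon keyStr.toList encoded.toList) := by
  simp only [solution]
  rw [pvSorted2_bridge keyStr.toList, pvA_answer encoded.toList keyStr.toList,
    pvJoinNil, List.flatten_append]
  simp only [pvCanon]
  rw [pvFlattenSingletons]
  simp

theorem pvB_grid (K : List Char) (cs : List (List Char)) (c : Nat) (hc : c < K.length) :
    (((List.range K.length).foldl (fun g j => g.set ((pvOrd K).getD j 0) (cs.getD j []))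
        (List.replicate K.length ([] : List Char))).getD c [])
      = cs.getD ((pvOrd K).idxOf c) [] := by
  have hfold : (List.range K.length).foldl (fun g j => g.set ((pvOrd K).getD j 0) (cs.getD j []))
        (List.replicate K.length ([] : List Char))
      = pvSetFold ((List.range K.length).map (fun j => ((pvOrd K).getD j 0, cs.getD j [])))
          (List.replicate K.length ([] : List Char)) := by
    rw [pvSetFold, List.foldl_map]
  have hfst : ((List.range K.length).map (fun j => (((pvOrd K).getD j 0, cs.getD j []) : Nat × List (Char)))).map Prod.fst = pvOrd K := by
    rw [List.map_map]
    refine List.ext_getElem (by simp [pvOrd_length]) ?_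
    intro i h1 h2
    simp only [List.getElem_map, List.getElem_range, Function.comp]
    rw [List.getD_eq_getElem?_getD, List.getElem?_eq_getElem (by simpa using h2)]
    rfl
  have hmem : ((c, cs.getD ((pvOrd K).idxOf c) []) : Nat × List Char)
      ∈ (List.range K.length).map (fun j => ((pvOrd K).getD j 0, cs.getD j [])) := by
    rw [List.mem_map]
    exact ⟨(pvOrd K).idxOf c, List.mem_range.mpr (pvOrd_idxOf_lt K c hc),
      by rw [pvOrd_getD_idxOf K c hc]⟩
  rw [hfold, List.getD_eq_getElem?_getD,
    pvSetFold_getElem?_mem _ _ c _ (by rw [hfst]; exact pvOrd_nodup K) hmem (by simpa using hc)]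
  rfl

theorem pvB_main (K E : List Char) (h : K ≠ []) (p : Nat)
    (hp : p < E.length / K.length * K.length) :
    ((((List.range K.length).foldl (fun g j => g.set ((pvOrd K).getD j 0)
          (((List.range K.length).map (fun j => PySem.List.slice E
              (some ((j * (E.length / K.length) : Nat) : Int))
              (some (((j + 1) * (E.length / K.length) : Nat) : Int)))).getD j []))
        (List.replicate K.length ([] : List Char))).getD (p % K.length) []).getD (p / K.length) ' ')
      = E.getD (p / K.length + (pvOrd K).idxOf (p % K.length) * (E.length / K.length)) ' ' := by
  have hm0 : 0 < K.length := List.length_pos_of_ne_nil h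
  have hnm : E.length / K.length * K.length ≤ E.length := Nat.div_mul_le_self _ _
  have hpm : p % K.length < K.length := Nat.mod_lt _ hm0
  have hpd : p / K.length < E.length / K.length :=
    Nat.div_lt_of_lt_mul (by rw [Nat.mul_comm]; exact hp)
  rw [pvB_grid K _ _ hpm]
  set j := (pvOrd K).idxOf (p % K.length) with hj
  have hjm : j < K.length := pvOrd_idxOf_lt K _ hpm
  rw [PySem.List.getD_map_range _ _ _ _ hjm]
  have hsl : PySem.List.slice E (some ((j * (E.length / K.length) : Nat) : Int))
        (some (((j + 1) * (E.length / K.length) : Nat) : Int))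
      = (E.drop (j * (E.length / K.length))).take (E.length / K.length) := by
    rw [PySem.List.slice_natCast]
    congr 1
    have : (j + 1) * (E.length / K.length)
        = j * (E.length / K.length) + E.length / K.length := by ring
    rw [this, Nat.add_sub_cancel_left]
  rw [hsl, List.getD_eq_getElem?_getD, List.getElem?_take, if_pos hpd, List.getElem?_drop]
  have hidx : j * (E.length / K.length) + p / K.length < E.length := by
    have h1 : (j + 1) * (E.length / K.length) ≤ K.length * (E.length / K.length) :=
      Nat.mul_le_mul_right _ (by omega)
    have h2 : (j + 1) * (E.length / K.length)
        = j * (E.length / K.length) + E.length / K.length := by ring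
    have h3 : K.length * (E.length / K.length) = E.length / K.length * K.length :=
      Nat.mul_comm _ _
    omega
  rw [List.getElem?_eq_getElem hidx, List.getD_eq_getElem?_getD,
    List.getElem?_eq_getElem (by omega : p / K.length + j * (E.length / K.length) < E.length)]
  simp only [Option.getD_some]
  congr 1
  omega

theorem pvB_eq (keyStr encoded : String) (h : keyStr.toList ≠ []) :
    solution_alt keyStr encoded = String.ofList (pvCanon keyStr.toList encoded.toList) := by
  simp only [solution_alt]
  rw [show PySem.List.sorted (List.range keyStr.toList.length)
      (fun i => keyStr.toList.getD i ' ') = pvOrd keyStr.toList from rfl]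
  rw [pvRangeMul (encoded.toList.length / keyStr.toList.length) keyStr.toList.length]
  simp only [pvCanon]
  congr 1
  refine List.map_congr_left (fun p hp => ?_)
  exact pvB_main keyStr.toList encoded.toList h p (List.mem_range.mp hp)

-- ===== VERDICT (by name: the statement is the Claim_ definition above) =====
theorem solution_spec : Claim_equal_solution := by
  intro keyStr encoded _ hpre
  unfold Spec_solution
  rw [pvA_eq, pvB_eq _ _ hpre]
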